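-- pv_equiv track=rewrite | github.com/protocoloagi/Aira-Lite-juguete | modulos/reglas.py | filtrar
-- ===== SOURCE A (Python) =====
-- def filtrar(texto):
--     """
--     Reglas mínimas de higiene verbal.
--     """
--     t = texto.lower()
--
--     prohibidas = ["mátate", "suicídate", "odio", "racista", "terrorista"]
--     for p in prohibidas:
--         if p in t:
--             return "Prefiero no hablar de eso. Cambiemos de tema."
--
--     if len(t) > 300:
--         return t[:300] + "..."
--
--     return texto
-- ===== SOURCE B (Python) =====
-- def filtrar(texto):
--     """
--     Reglas mínimas de higiene verbal.
--     """
--     t = texto.lower()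
--     palabras = ("mátate", "suicídate", "odio", "racista", "terrorista")
--     # single left-to-right scan: at each position test whether any forbidden
--     # word starts there (regex-alternation style), instead of one full
--     # substring search per word
--     for i in range(len(t)):
--         if any(t.startswith(p, i) for p in palabras):
--             return "Prefiero no hablar de eso. Cambiemos de tema."
--     if len(t) > 300:
--         return t[:300] + "..."
--     return texto
-- ===== Notes on version B (the rewrite author's own statement) =====
-- stated objective: alternative
-- what changed: Replaces the per-word full substring search (five separate 'p in t' scans) by one left-to-right scan over the text that at each position tests whether any forbidden word starts there (regex-alternation style).
import Mathlib
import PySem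

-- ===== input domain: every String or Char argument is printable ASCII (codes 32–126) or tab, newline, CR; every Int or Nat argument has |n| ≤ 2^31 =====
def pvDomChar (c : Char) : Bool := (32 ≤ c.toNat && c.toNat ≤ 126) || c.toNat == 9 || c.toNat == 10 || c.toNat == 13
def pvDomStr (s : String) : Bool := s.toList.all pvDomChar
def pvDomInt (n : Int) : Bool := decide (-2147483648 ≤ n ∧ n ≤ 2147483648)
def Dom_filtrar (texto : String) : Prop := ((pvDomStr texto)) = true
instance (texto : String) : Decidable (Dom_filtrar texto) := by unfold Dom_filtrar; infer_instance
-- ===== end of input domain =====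

-- B replaces the five separate substring searches by one left-to-right scan that
-- tests every forbidden word at each position (regex-alternation style); same cost, alternative structure.


-- ===== PORT A =====
def filtrarProhibidas : List String := ["mátate", "suicídate", "odio", "racista", "terrorista"]

def filtrarMsg : String := "Prefiero no hablar de eso. Cambiemos de tema."

-- the 'for p in prohibidas: if p in t: return …' loop
def filtrarLoop (t : String) : List String → Option String
  | [] => none
  | p :: rest => if PySem.Str.isIn p t then some filtrarMsg else filtrarLoop t rest

def filtrar (texto : String) : String :=
  let t := PySem.Str.lower texto
  match filtrarLoop t filtrarProhibidas with
  | some r => r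
  | none =>
    if 300 < PySem.Str.len t then
      String.ofList (PySem.Chars.slice t.toList none (some 300) ++ "...".toList)
    else texto

-- ===== PORT B =====
def filtrarAltPalabras : List String := ["mátate", "suicídate", "odio", "racista", "terrorista"]

-- 'for i in range(len(t)): if any(t.startswith(p, i) for p in palabras)':
-- recursion over the successive suffixes t[i:]; t.startswith(p, i) is 'p <+: t[i:]'
def filtrarAltScan (palabras : List String) : List Char → Bool
  | [] => false
  | c :: rest =>
      palabras.any (fun p => PySem.Chars.startswith (c :: rest) p.toList) ||
        filtrarAltScan palabras rest

def filtrar_alt (texto : String) : String :=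
  let t := PySem.Chars.lower texto.toList
  if filtrarAltScan filtrarAltPalabras t then
    "Prefiero no hablar de eso. Cambiemos de tema."
  else if 300 < t.length then
    String.ofList (PySem.Chars.slice t none (some 300) ++ "...".toList)
  else texto

-- ===== PRECONDITION & SPEC =====
def Spec_filtrar (texto : String) (out : String) : Prop := out = filtrar_alt texto
instance (texto : String) (out : String) : Decidable (Spec_filtrar texto out) := by unfold Spec_filtrar; infer_instance

-- ===== CLAIM (what is proved, stated in full; the proofs are below) =====
def Claim_equal_filtrar : Prop := ∀ (texto : String), Dom_filtrar texto → Spec_filtrar texto (filtrar texto)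

-- ===== LEMMAS AND PROOFS =====

-- A's word loop returns the message iff some forbidden word occurs in t
theorem filtrarLoop_eq (t : String) (ws : List String) :
    filtrarLoop t ws =
      if ws.any (fun p => PySem.Str.isIn p t) then some filtrarMsg else none := by
  induction ws with
  | nil => simp [filtrarLoop]
  | cons p rest ih =>
    simp only [filtrarLoop, ih, List.any_cons, Bool.or_eq_true]
    split_ifs <;> tauto

-- 'sub in (c :: rest)' is 'starts at position 0, or sub in rest'
theorem isIn_cons (p : List Char) (c : Char) (rest : List Char) :
    PySem.Chars.isIn p (c :: rest) =
      (PySem.Chars.startswith (c :: rest) p || PySem.Chars.isIn p rest) := by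
  rw [Bool.eq_iff_iff]
  simp [PySem.Chars.isIn_iff_infix, PySem.Chars.startswith_iff, List.infix_cons_iff]

-- B's position scan finds a match iff some (nonempty) word occurs as a substring
theorem filtrarAltScan_eq (ws : List String) (hw : ∀ p ∈ ws, p.toList ≠ [])
    (s : List Char) :
    filtrarAltScan ws s = ws.any (fun p => PySem.Chars.isIn p.toList s) := by
  induction s with
  | nil =>
    simp only [filtrarAltScan]
    symm
    simp only [List.any_eq_false]
    intro p hp
    rw [PySem.Chars.isIn_iff_infix]
    simpa [List.infix_nil] using hw p hp
  | cons c rest ih =>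
    simp only [filtrarAltScan, ih]
    rw [Bool.eq_iff_iff]
    simp only [Bool.or_eq_true, List.any_eq_true, isIn_cons]
    aesop

-- ===== VERDICT (by name: the statement is the Claim_ definition above) =====
theorem filtrar_spec : Claim_equal_filtrar := by
  intro texto _
  unfold Spec_filtrar
  show filtrar texto = filtrar_alt texto
  have hw : ∀ p ∈ filtrarAltPalabras, p.toList ≠ [] := by decide
  simp only [filtrar, filtrar_alt, filtrarLoop_eq, filtrarAltScan_eq _ hw]
  have hpal : filtrarAltPalabras = filtrarProhibidas := rfl
  have hlt : (PySem.Str.lower texto).toList = PySem.Chars.lower texto.toList := by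
    simp [PySem.Str.toList_lower]
  by_cases hc : filtrarProhibidas.any
      (fun p => PySem.Chars.isIn p.toList (PySem.Chars.lower texto.toList)) = true
  · have hc' : filtrarProhibidas.any
        (fun p => PySem.Str.isIn p (PySem.Str.lower texto)) = true := by
      simpa [PySem.Str.isIn_eq, hlt] using hc
    simp [hpal, hc, filtrarMsg]
  · have hc' : ¬ filtrarProhibidas.any
        (fun p => PySem.Str.isIn p (PySem.Str.lower texto)) = true := by
      simpa [PySem.Str.isIn_eq, hlt] using hc
    simp only [hpal, hc, hc', if_false, Bool.false_eq_true]
    simp [PySem.Str.len_eq, hlt]
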